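-- pv_equiv track=rewrite | github.com/kyan001/PyMyApps | Maths/permutations.py | arrangement
-- ===== SOURCE A (Python) =====
-- def arrangement(n: int, m: int = None) -> int:  # A_n^m
--     if m is None:
--         return a(n, n)
--     if m > n or m < 1 or n < 1:
--         raise ValueError(f"1 <= {m} <= {n} does not satisfied")
--     if m == 1:
--         return n
--     return arrangement(n, m - 1) * (n - m + 1)
--
-- a = arrangement
-- ===== SOURCE B (Python) =====
-- def arrangement(n: int, m: int = None) -> int:  # A_n^m
--     if m is None:
--         m = n
--     if m > n or m < 1 or n < 1:
--         raise ValueError(f"1 <= {m} <= {n} does not satisfied")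
--     result = 1
--     for i in range(m):
--         result *= n - i
--     return result
-- ===== Notes on version B (the rewrite author's own statement) =====
-- stated objective: idiomatic
-- what changed: Replaces the O(m) recursion arrangement(n,m-1)*(n-m+1) with an iterative product loop result *= (n-i) for i in range(m), resolving m=None to n before a single validation.
import Mathlib
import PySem

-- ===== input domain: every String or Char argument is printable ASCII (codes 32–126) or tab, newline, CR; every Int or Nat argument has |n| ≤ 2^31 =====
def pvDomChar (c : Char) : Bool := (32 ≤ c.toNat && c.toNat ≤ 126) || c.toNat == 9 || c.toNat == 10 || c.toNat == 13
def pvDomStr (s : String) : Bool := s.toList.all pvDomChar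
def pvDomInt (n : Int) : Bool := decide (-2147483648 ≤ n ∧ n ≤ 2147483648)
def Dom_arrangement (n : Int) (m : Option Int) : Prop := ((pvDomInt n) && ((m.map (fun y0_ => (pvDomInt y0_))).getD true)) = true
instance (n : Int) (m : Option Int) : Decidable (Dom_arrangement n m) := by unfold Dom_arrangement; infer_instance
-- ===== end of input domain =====

-- B computes the same permutation count A(n,m) with an iterative product over range(m)
-- instead of A's recursion; return-value equivalence on all inputs where A returns (Pre_).

-- ===== PORT A =====
-- A's recursion on m; the ValueError path (excluded by Pre_) returns 0.
def arrangementGo (n : Int) (m : Int) : Int :=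
  if m > n ∨ m < 1 ∨ n < 1 then 0
  else if m = 1 then n
  else arrangementGo n (m - 1) * (n - m + 1)
termination_by m.toNat
decreasing_by omega

def arrangement (n : Int) (m : Option Int) : Int :=
  match m with
  | none => arrangementGo n n      -- `return a(n, n)`
  | some mm => arrangementGo n mm

-- ===== PORT B =====
def arrangement_alt (n : Int) (m : Option Int) : Int :=
  let mm := m.getD n               -- `if m is None: m = n`
  if mm > n ∨ mm < 1 ∨ n < 1 then 0   -- ValueError path, excluded by Pre_
  else (PySem.List.pyRange 0 mm 1).foldl (fun r i => r * (n - i)) 1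

-- ===== PRECONDITION & SPEC =====
-- Exactly the inputs on which Python A returns (no ValueError): 1 <= m <= n (with m defaulting to n).
def Pre_arrangement (n : Int) (m : Option Int) : Prop :=
  1 ≤ m.getD n ∧ m.getD n ≤ n
instance (n : Int) (m : Option Int) : Decidable (Pre_arrangement n m) := by
  unfold Pre_arrangement; infer_instance

def pvWitness_arrangement : Int × Option Int := (5, some 3)

def Spec_arrangement (n : Int) (m : Option Int) (out : Int) : Prop := out = arrangement_alt n m
instance (n : Int) (m : Option Int) (out : Int) : Decidable (Spec_arrangement n m out) := by
  unfold Spec_arrangement; infer_instance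

-- ===== CLAIM (what is proved, stated in full; the proofs are below) =====
def Claim_equal_arrangement : Prop :=
  ∀ (n : Int) (m : Option Int), Dom_arrangement n m → Pre_arrangement n m →
    Spec_arrangement n m (arrangement n m)

-- ===== LEMMAS AND PROOFS =====

theorem arrangementGo_eq_foldl (n : Int) :
    ∀ (k : Nat) (m : Int), m.toNat = k → 1 ≤ m → m ≤ n →
      arrangementGo n m = (PySem.List.pyRange 0 m 1).foldl (fun r i => r * (n - i)) 1 := by
  intro k
  induction k with
  | zero => intro m hk h1 _; omega
  | succ k ih =>
    intro m hk h1 h2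
    by_cases hm1 : m = 1
    · subst hm1
      rw [arrangementGo]
      have : ¬ ((1 : Int) > n ∨ (1 : Int) < 1 ∨ n < 1) := by omega
      rw [if_neg this, if_pos rfl]
      have h01 : PySem.List.pyRange 0 1 1 = [0] := by
        simpa using PySem.List.pyRange_one_singleton (a := 0)
      rw [h01]
      simp
    · rw [arrangementGo]
      have hg : ¬ (m > n ∨ m < 1 ∨ n < 1) := by omega
      rw [if_neg hg, if_neg hm1]
      rw [ih (m - 1) (by omega) (by omega) (by omega)]
      have hsplit : PySem.List.pyRange 0 m 1
          = PySem.List.pyRange 0 (m - 1) 1 ++ [m - 1] := by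
        have := PySem.List.pyRange_one_succ_right (a := 0) (b := m - 1) (by omega)
        simpa using this
      rw [hsplit, List.foldl_append]
      simp only [List.foldl_cons, List.foldl_nil]
      ring

-- ===== VERDICT (by name: the statement is the Claim_ definition above) =====
theorem arrangement_spec : Claim_equal_arrangement := by
  intro n m _ hpre
  obtain ⟨h1, h2⟩ := hpre
  cases m with
  | none =>
    simp only [Option.getD] at h1 h2
    unfold Spec_arrangement arrangement arrangement_alt
    simp only [Option.getD_none]
    rw [if_neg (by omega)]
    exact arrangementGo_eq_foldl n n.toNat n rfl h1 h2
  | some mm =>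
    simp only [Option.getD_some] at h1 h2
    unfold Spec_arrangement arrangement arrangement_alt
    simp only [Option.getD_some]
    rw [if_neg (by omega)]
    exact arrangementGo_eq_foldl n mm.toNat mm rfl h1 h2
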